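-- pv_equiv track=rewrite | github.com/KyryloKozlovskyi/Graph-Definitely-Isomorphic-Analysis | main.py | decision_tree_candidates
-- ===== SOURCE A (Python) =====
-- def get_degree(V, E):
--     """
--     Get the degree of each vertex in a graph. The degree of a vertex is the number of edges connected to it.
--     :param V: List of vertices
--     :param E: List of edges
--     :return: Dictionary with vertices as keys and their degrees as values
--     """
--     # Create a dictionary to store the degree of each vertex and initialize it with 0
--     counts = {v: 0 for v in V}
--     # Iterate over the vertices
--     for v in V:
--         # Iterate over the edges
--         for e in E:
--             # If the vertex is in the edge, increment the count
--             if v in e: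
--                 counts[v] += 1
--     # Return the dictionary with degrees
--     return counts
--
-- def decision_tree_candidates(G1, G2):
--     """
--     Generates candidate mappings between two graphs (likely isomorphic).
--
--     Approach:
--     1. First, check the degree of each vertex in both graphs
--     2. For each vertex in G1, find all vertices in G2 with the same degree
--     3. Build possible mappings using a tree approach:
--        - Start with an empty mapping
--        - For each vertex in G1, extend existing mappings with compatible vertices from G2
--        - A vertex from G2 is compatible if it has the same degree and hasn't been used yet
--     4. Results are all possible vertex mappings that preserve degree
--
--     This method significantly reduces the number of total mappings compared to testing all permutations.
--     It acts as a decision tree, avoiding combinations early if the degrees don't match.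
--
--     :param G1: First graph (V1, E1)
--     :param G2: Second graph (V2, E2)
--     :return: A sorted list of all possible mappings from G1 to G2.
--     """
--
--     # Unpack the graphs
--     V1, E1 = G1  # Graph 1 (V1, E1)
--     V2, E2 = G2  # Graph 2 (V2, E2)
--
--     # Get the degrees of each vertex in both graphs
--     deg1 = get_degree(V1, E1)  # Degree of vertices in graph 1
--     deg2 = get_degree(V2, E2)  # Degree of vertices in graph 2
--
--     # Check if the number of vertices is the same in both graphs
--     mapping_dict = {}  # Dictionary to store possible mappings
--     for v in V1:  # Iterate over vertices in graph 1
--         d1 = deg1[v]  # Get the degree of the current vertex in graph 1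
--         possible = {w for w in V2 if deg2[w] == d1}  # Find vertices in graph 2 with the same degree
--         mapping_dict[v] = possible  # Store the possible mappings for the current vertex
--
--     # Check if the number of possible mappings is the same for each vertex
--     index_map = {label: i for i, label in enumerate(V2)}
--
--     # Check if the number of possible mappings is the same for each vertex
--     mappings = [[]]  # Initialize mappings with an empty list
--     for v in V1:  # Iterate over vertices in graph 1
--         current = []  # Initialize current mappings
--         for m in mappings:  # Iterate over existing mappings
--             for option in mapping_dict[v]:  # Iterate over possible mappings for the current vertex
--                 idx = index_map[option]  # Get the index of the option in graph 2
--                 if idx not in m:  # Check if the option is already used in the current mapping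
--                     current.append(m + [idx])  # Add the new mapping to the current list
--         mappings = current  # Update mappings with the current list
--     # Return sorted mappings
--     return sorted([tuple(m) for m in mappings])
-- ===== SOURCE B (Python) =====
-- def get_degree(V, E):
--     """Same helper as the original module (degree dict, per-occurrence counting)."""
--     counts = {v: 0 for v in V}
--     for v in V:
--         for e in E:
--             if v in e:
--                 counts[v] += 1
--     return counts
--
-- def decision_tree_candidates(G1, G2):
--     """Recursive backtracking (depth-first) enumeration of degree-preserving
--     mappings, instead of the original breadth-first level-by-level expansion."""
--     V1, E1 = G1
--     V2, E2 = G2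
--     deg1 = get_degree(V1, E1)
--     deg2 = get_degree(V2, E2)
--     index_map = {label: i for i, label in enumerate(V2)}
--     options = {v: list(dict.fromkeys(w for w in V2 if deg2[w] == deg1[v])) for v in V1}
--     results = []
--
--     def backtrack(vs, used):
--         if not vs:
--             results.append(tuple(used))
--             return
--         for w in options[vs[0]]:
--             idx = index_map[w]
--             if idx not in used:
--                 backtrack(vs[1:], used + [idx])
--
--     backtrack(V1, [])
--     return sorted(results)
-- ===== Notes on version B (the rewrite author's own statement) =====
-- stated objective: alternative
-- what changed: The breadth-first level-by-level expansion of partial mappings (rebuilding the whole list of partial mappings per G1 vertex) is replaced by a recursive depth-first backtracking enumeration over the G1 vertex list; preprocessing (degree dict, per-vertex option lists, index map) is kept.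
import Mathlib
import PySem

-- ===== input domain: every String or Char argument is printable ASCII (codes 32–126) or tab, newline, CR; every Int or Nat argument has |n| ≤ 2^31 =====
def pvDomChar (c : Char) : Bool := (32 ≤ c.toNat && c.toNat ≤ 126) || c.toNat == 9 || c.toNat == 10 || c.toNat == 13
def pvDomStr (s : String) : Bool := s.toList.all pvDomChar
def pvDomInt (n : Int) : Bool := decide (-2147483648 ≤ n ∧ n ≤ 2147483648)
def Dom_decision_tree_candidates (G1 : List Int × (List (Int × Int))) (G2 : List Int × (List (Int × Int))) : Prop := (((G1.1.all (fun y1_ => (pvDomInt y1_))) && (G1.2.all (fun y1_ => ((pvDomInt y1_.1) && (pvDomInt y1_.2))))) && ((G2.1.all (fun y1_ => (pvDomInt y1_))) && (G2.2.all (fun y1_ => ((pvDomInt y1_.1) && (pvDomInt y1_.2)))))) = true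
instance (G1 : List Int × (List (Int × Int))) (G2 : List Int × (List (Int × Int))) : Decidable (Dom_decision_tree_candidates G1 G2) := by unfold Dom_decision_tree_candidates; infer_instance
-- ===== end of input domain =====

-- B replaces A's breadth-first level-by-level mapping expansion with a recursive
-- depth-first backtracking enumeration (same preprocessing); objective: alternative.
-- ===== PORT A =====
-- shared module helper (Source B keeps it verbatim): degree dict, per-occurrence counting
def get_degree (V : List Int) (E : List (Int × Int)) : PySem.Dict Int Int :=
  let counts := V.foldl (fun d v => d.insert v 0) PySem.Dict.empty
  V.foldl (fun d v =>
    E.foldl (fun d e => if v = e.1 ∨ v = e.2 then d.modify v 0 (· + 1) else d) d) counts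

def decision_tree_candidates (G1 : List Int × (List (Int × Int))) (G2 : List Int × (List (Int × Int))) : List (List Int) :=
  let V1 := G1.1; let E1 := G1.2
  let V2 := G2.1; let E2 := G2.2
  let deg1 := get_degree V1 E1
  let deg2 := get_degree V2 E2
  let mapping_dict := V1.foldl (fun d v =>
      let d1 := deg1.getD v 0
      let possible : PySem.Set Int := PySem.Set.ofList (V2.filter (fun w => deg2.getD w 0 = d1))
      d.insert v possible) PySem.Dict.empty
  let index_map := (PySem.List.enumerate V2 0).foldl
      (fun d (p : Int × Int) => d.insert p.2 p.1) PySem.Dict.empty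
  let mappings := V1.foldl (fun ms v =>
      ms.foldl (fun cur m =>
        (mapping_dict.getD v []).foldl (fun cur option =>
          let idx := index_map.getD option 0
          if idx ∈ m then cur else cur ++ [m ++ [idx]]) cur) []) [[]]
  PySem.List.sorted mappings (fun x => x) false

-- ===== PORT B =====
-- Source B's recursive backtrack(vs, used): DFS over remaining G1 vertices
def dtc_backtrack (options : PySem.Dict Int (List Int)) (index_map : PySem.Dict Int Int)
    (vs : List Int) (used : List Int) : List (List Int) :=
  match vs with
  | [] => [used]
  | v :: rest =>
    (options.getD v []).foldl (fun acc w =>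
      let idx := index_map.getD w 0
      if idx ∈ used then acc else acc ++ dtc_backtrack options index_map rest (used ++ [idx])) []

def decision_tree_candidates_alt (G1 : List Int × (List (Int × Int))) (G2 : List Int × (List (Int × Int))) : List (List Int) :=
  let V1 := G1.1; let E1 := G1.2
  let V2 := G2.1; let E2 := G2.2
  let deg1 := get_degree V1 E1
  let deg2 := get_degree V2 E2
  let index_map := (PySem.List.enumerate V2 0).foldl
      (fun d (p : Int × Int) => d.insert p.2 p.1) PySem.Dict.empty
  let options := V1.foldl (fun d v =>
      d.insert v (PySem.List.dedup (V2.filter (fun w => deg2.getD w 0 = deg1.getD v 0)))) PySem.Dict.empty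
  PySem.List.sorted (dtc_backtrack options index_map V1 []) (fun x => x) false

-- ===== PRECONDITION & SPEC =====
def Spec_decision_tree_candidates (G1 : List Int × (List (Int × Int))) (G2 : List Int × (List (Int × Int))) (out : List (List Int)) : Prop := out = decision_tree_candidates_alt G1 G2
instance (G1 : List Int × (List (Int × Int))) (G2 : List Int × (List (Int × Int))) (out : List (List Int)) : Decidable (Spec_decision_tree_candidates G1 G2 out) := by unfold Spec_decision_tree_candidates; infer_instance

-- ===== CLAIM (what is proved, stated in full; the proofs are below) =====
def Claim_equal_decision_tree_candidates : Prop := ∀ (G1 : List Int × (List (Int × Int))) (G2 : List Int × (List (Int × Int))), Dom_decision_tree_candidates G1 G2 → Spec_decision_tree_candidates G1 G2 (decision_tree_candidates G1 G2)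

-- ===== LEMMAS AND PROOFS =====

-- one backtracking step over the option list, abstracted: folding with
-- 'acc ++ backtrack …' equals folding with 'acc ++ [extension]' then flatMapping backtrack
lemma dtc_step_flatMap (md : PySem.Dict Int (List Int)) (im : PySem.Dict Int Int)
    (vs : List Int) (m : List Int) (os : List Int) (B A : List (List Int))
    (h : A = B.flatMap (fun m' => dtc_backtrack md im vs m')) :
    os.foldl (fun acc w =>
        let idx := im.getD w 0
        if idx ∈ m then acc else acc ++ dtc_backtrack md im vs (m ++ [idx])) A
    = (os.foldl (fun cur o =>
        let idx := im.getD o 0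
        if idx ∈ m then cur else cur ++ [m ++ [idx]]) B).flatMap
        (fun m' => dtc_backtrack md im vs m') := by
  induction os generalizing A B with
  | nil => simpa using h
  | cons o os ih =>
    simp only [List.foldl_cons]
    apply ih
    by_cases hm : im.getD o 0 ∈ m
    · simp [hm, h]
    · simp [hm, h]

-- A's inner double loop over ms produces ms.flatMap of the single-m extension
lemma dtc_inner_flatMap (md : PySem.Dict Int (List Int)) (im : PySem.Dict Int Int)
    (v : Int) (ms : List (List Int)) (acc : List (List Int)) :
    ms.foldl (fun cur m =>
        (md.getD v []).foldl (fun cur o =>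
          let idx := im.getD o 0
          if idx ∈ m then cur else cur ++ [m ++ [idx]]) cur) acc
    = acc ++ ms.flatMap (fun m =>
        (md.getD v []).foldl (fun cur o =>
          let idx := im.getD o 0
          if idx ∈ m then cur else cur ++ [m ++ [idx]]) []) := by
  induction ms generalizing acc with
  | nil => simp
  | cons m ms ih =>
    simp only [List.foldl_cons, List.flatMap_cons, ih]
    have : ∀ (os : List Int) (a : List (List Int)),
        os.foldl (fun cur o =>
          let idx := im.getD o 0
          if idx ∈ m then cur else cur ++ [m ++ [idx]]) a
        = a ++ os.foldl (fun cur o =>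
          let idx := im.getD o 0
          if idx ∈ m then cur else cur ++ [m ++ [idx]]) [] := by
      intro os
      induction os with
      | nil => simp
      | cons o os ih2 =>
        intro a
        simp only [List.foldl_cons]
        by_cases hm : im.getD o 0 ∈ m
        · simpa [hm] using ih2 a
        · rw [ih2, ih2]
          simp only [hm]
          simpa using (ih2 [m ++ [im.getD o 0]]).symm
    rw [this]
    simp [List.append_assoc]

-- BFS level expansion = flatMap of DFS backtracking
lemma dtc_bfs_eq_dfs (md : PySem.Dict Int (List Int)) (im : PySem.Dict Int Int)
    (vs : List Int) (ms : List (List Int)) :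
    vs.foldl (fun ms v =>
      ms.foldl (fun cur m =>
        (md.getD v []).foldl (fun cur o =>
          let idx := im.getD o 0
          if idx ∈ m then cur else cur ++ [m ++ [idx]]) cur) []) ms
    = ms.flatMap (fun m => dtc_backtrack md im vs m) := by
  induction vs generalizing ms with
  | nil => simp [dtc_backtrack]
  | cons v vs ih =>
    simp only [List.foldl_cons]
    rw [ih, dtc_inner_flatMap]
    simp only [List.nil_append, List.flatMap_assoc]
    apply List.flatMap_congr ?_  -- congruence over ms
    intro m _
    rw [dtc_backtrack]
    exact (dtc_step_flatMap md im vs m (md.getD v []) [] [] (by simp)).symm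

-- ===== VERDICT (by name: the statement is the Claim_ definition above) =====
theorem decision_tree_candidates_spec : Claim_equal_decision_tree_candidates := by
  intro G1 G2 _
  show _ = _
  unfold decision_tree_candidates decision_tree_candidates_alt
  simp only [PySem.List.dedup_eq_ofList]
  rw [dtc_bfs_eq_dfs]
  simp
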